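-- pv_equiv track=rewrite | github.com/ajkerrigan/break-left-bake | trivy_check.py | extract_rule
-- ===== SOURCE A (Python) =====
-- def extract_rule(lines):
--
--     start_token = "scan.Rule{"
--     end_token = "},"
--
--     start_pos = None
--     end_pos = None
--     rule_keys = (
--         "AVDID",
--         "Provider",
--         "Service",
--         "ShortCode",
--         "Summary",
--         "Impact",
--         "Resolution",
--         "Explanation",
--         "Severity",
--     )
--
--     for idx, line in enumerate(lines):
--         if start_token in line:
--             start_pos = (idx, line.index(start_token))
--         if not start_pos:
--             continue
--         if end_token == line.strip() and line.index(end_token) == start_pos[-1]: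
--             end_pos = idx
--             break
--
--     if not start_pos:
--         return
--     if not end_pos:
--         return
--     rule = {}
--     block = lines[start_pos[0] + 1 : end_pos]
--
--     for l in block:
--         for k in rule_keys:
--             if l.strip().startswith(k):
--                 v = l.split(":", 1)[-1]
--                 v = v.strip().strip('"').strip(",")
--                 rule[k.lower()] = v
--     return rule
-- ===== SOURCE B (Python) =====
-- def extract_rule(lines):
--     start_token = "scan.Rule{"
--     end_token = "},"
--     rule_keys = (
--         "AVDID",
--         "Provider",
--         "Service",
--         "ShortCode",
--         "Summary",
--         "Impact",
--         "Resolution",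
--         "Explanation",
--         "Severity",
--     )
--
--     col = None
--     rule = {}
--     for line in lines:
--         if start_token in line:
--             # (re)start a block at this line's column; drop anything gathered so far
--             col = line.index(start_token)
--             rule = {}
--             continue
--         if col is None:
--             continue
--         if line.strip() == end_token and line.index(end_token) == col:
--             return rule
--         for k in rule_keys:
--             if line.strip().startswith(k):
--                 v = line.split(":", 1)[-1]
--                 rule[k.lower()] = v.strip().strip('"').strip(",")
--     return None
-- ===== Notes on version B (the rewrite author's own statement) =====
-- stated objective: simpler
-- what changed: Replaced A's two-pass scheme (enumerate to find block boundaries, then slice the list and re-scan the slice to fill the dict) with a single streaming pass that keeps the current start column and dict as it goes, resetting the dict on each new start token and returning it at the matching-column end line.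
import Mathlib
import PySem

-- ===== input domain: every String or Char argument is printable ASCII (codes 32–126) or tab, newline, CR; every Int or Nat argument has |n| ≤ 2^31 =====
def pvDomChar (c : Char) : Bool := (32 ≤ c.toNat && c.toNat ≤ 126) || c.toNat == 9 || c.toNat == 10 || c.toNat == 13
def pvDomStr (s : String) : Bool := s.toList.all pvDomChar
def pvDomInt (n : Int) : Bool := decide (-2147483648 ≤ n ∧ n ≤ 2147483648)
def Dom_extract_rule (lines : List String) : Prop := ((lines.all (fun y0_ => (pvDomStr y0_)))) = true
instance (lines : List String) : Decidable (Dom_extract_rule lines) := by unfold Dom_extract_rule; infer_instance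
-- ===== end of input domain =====

-- B replaces A's two-pass scheme (find block boundaries, then re-extract over a slice of the
-- original list) by a single streaming pass that resets its accumulator on each new start token
-- (objective: simpler one-pass decomposition; equivalence of return values proved below).


-- ===== PORT A =====
-- rule_keys tuple (identical literal in both Pythons)
def pvRuleKeys : List String :=
  ["AVDID", "Provider", "Service", "ShortCode", "Summary", "Impact",
   "Resolution", "Explanation", "Severity"]

-- the inner `for k in rule_keys:` body applied to one line l (identical code in A and B):
-- l.split(":", 1)[-1] then .strip().strip('"').strip(","), stored under k.lower().
-- split(":",1) never returns none (sep ≠ "") and never returns [], so pyGet? _ (-1) is exact.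
def pvApplyKeys (rule : PySem.Dict String String) (l : String) : PySem.Dict String String :=
  pvRuleKeys.foldl (fun r k =>
    if PySem.Str.startswith (PySem.Str.strip l) k then
      let v := (PySem.List.pyGet? ((PySem.Str.splitMax? l ":" 1).getD [l]) (-1)).getD l
      r.insert (PySem.Str.lower k) (PySem.Str.stripChars (PySem.Str.stripChars (PySem.Str.strip v) "\"") ",")
    else r) rule

-- A's `for idx, line in enumerate(lines)` loop with its break, over the enumerated lines;
-- state = (start_pos, end_pos).  `line.index(tok)` is ported as PySem.Str.find: exact here
-- because each use is guarded (by `tok in line` resp. `tok == line.strip()`), so tok is present.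
def pvLoopA : List (Int × String) → Option (Int × Int) → Option (Int × Int) × Option Int
  | [], sp => (sp, none)
  | (idx, line) :: rest, sp =>
    let sp' := if PySem.Str.isIn "scan.Rule{" line then
                 some (idx, PySem.Str.find line "scan.Rule{") else sp
    match sp' with
    | none => pvLoopA rest none     -- `if not start_pos: continue`
    | some (s, c) =>
      if PySem.Str.strip line = "}," ∧ PySem.Str.find line "}," = c then
        (some (s, c), some idx)     -- end_pos = idx; break
      else pvLoopA rest (some (s, c))

def extract_rule (lines : List String) : Option (List (String × String)) :=
  match pvLoopA (PySem.List.enumerate lines 0) none with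
  | (none, _) => none                         -- `if not start_pos: return`
  | (some (s, _), ep) =>
    match ep with
    | none => none                            -- `if not end_pos: return` (None case)
    | some e =>
      if e = 0 then none                      -- `if not end_pos: return` (0 is falsy)
      else
        some (((PySem.List.slice lines (some (s + 1)) (some e)).foldl
                 pvApplyKeys PySem.Dict.empty).items)

-- ===== PORT B =====
-- one streaming pass: state = (current start column if inside a block, dict gathered so far)
def pvLoopB : List String → Option Int → PySem.Dict String String → Option (List (String × String))
  | [], _, _ => none
  | line :: rest, col, rule =>
    if PySem.Str.isIn "scan.Rule{" line then
      pvLoopB rest (some (PySem.Str.find line "scan.Rule{")) PySem.Dict.empty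
    else
      match col with
      | none => pvLoopB rest none rule
      | some c =>
        if PySem.Str.strip line = "}," ∧ PySem.Str.find line "}," = c then
          some rule.items
        else pvLoopB rest (some c) (pvApplyKeys rule line)

def extract_rule_alt (lines : List String) : Option (List (String × String)) :=
  pvLoopB lines none PySem.Dict.empty

-- ===== PRECONDITION & SPEC =====
def Spec_extract_rule (lines : List String) (out : Option (List (String × String))) : Prop := out = extract_rule_alt lines
instance (lines : List String) (out : Option (List (String × String))) : Decidable (Spec_extract_rule lines out) := by unfold Spec_extract_rule; infer_instance

-- ===== CLAIM (what is proved, stated in full; the proofs are below) =====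
def Claim_equal_extract_rule : Prop := ∀ (lines : List String), Dom_extract_rule lines → Spec_extract_rule lines (extract_rule lines)

-- ===== LEMMAS AND PROOFS =====

-- what A does after its loop, as a function of the loop's result
def pvFinishA (lines : List String) : Option (Int × Int) × Option Int → Option (List (String × String))
  | (none, _) => none
  | (some (s, _), ep) =>
    match ep with
    | none => none
    | some e =>
      if e = 0 then none
      else
        some (((PySem.List.slice lines (some (s + 1)) (some e)).foldl
                 pvApplyKeys PySem.Dict.empty).items)

theorem pvExtract_eq_finish (lines : List String) :
    extract_rule lines = pvFinishA lines (pvLoopA (PySem.List.enumerate lines 0) none) := by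
  unfold extract_rule pvFinishA
  rcases pvLoopA (PySem.List.enumerate lines 0) none with ⟨sp, ep⟩
  rcases sp with _ | ⟨s, c⟩ <;> rcases ep with _ | e <;> rfl

theorem pvMem_dropWhile_of_not {α : Type} (p : α → Bool) {c : α} :
    ∀ {l : List α}, c ∈ l → p c = false → c ∈ l.dropWhile p := by
  intro l; induction l with
  | nil => intro h; exact absurd h (List.not_mem_nil)
  | cons a l ih =>
    intro hm hp
    rw [List.dropWhile_cons]
    by_cases ha : p a = true
    · simp only [ha, if_true]
      rcases List.mem_cons.mp hm with rfl | hl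
      · exact absurd ha (by simp [hp])
      · exact ih hl hp
    · simp only [Bool.not_eq_true] at ha
      simp [ha, hm]

theorem pvMem_strip_of_not {c : Char} {cs : List Char}
    (hm : c ∈ cs) (hp : PySem.Chars.isspace c = false) : c ∈ PySem.Chars.strip cs := by
  unfold PySem.Chars.strip PySem.Chars.rstrip PySem.Chars.lstrip
  have h1 : c ∈ cs.dropWhile PySem.Chars.isspace := pvMem_dropWhile_of_not _ hm hp
  have h2 : c ∈ (cs.dropWhile PySem.Chars.isspace).reverse := List.mem_reverse.mpr h1
  exact List.mem_reverse.mpr (pvMem_dropWhile_of_not _ h2 hp)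

-- a line containing "scan.Rule{" cannot strip to "}," (it contains an 's')
theorem pvStart_not_end {line : String}
    (h : PySem.Str.isIn "scan.Rule{" line = true) : PySem.Str.strip line ≠ "}," := by
  intro hs
  have hinf : ("scan.Rule{").toList <:+: line.toList := (PySem.Str.isIn_iff_infix _ _).mp h
  have hmem : 's' ∈ line.toList := by
    rcases hinf with ⟨p, q, hpq⟩
    rw [← hpq]; simp
  have hst : PySem.Chars.strip line.toList = ['}', ','] := by
    have := congrArg String.toList hs
    rw [PySem.Str.toList_strip] at this
    simpa using this
  have : 's' ∈ PySem.Chars.strip line.toList := pvMem_strip_of_not hmem (by decide)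
  rw [hst] at this
  simp at this

-- the main invariant: A's remaining loop + post-processing = B's remaining streaming pass.
-- st is the shared state; when inside a block started at absolute line s with column c,
-- B's accumulated dict is exactly A's extraction fold over lines[s+1 : current position].
theorem pvMain : ∀ (cur pre : List String) (st : Option (Nat × Int)),
    (∀ s c, st = some (s, c) → s + 1 ≤ pre.length) →
    pvFinishA (pre ++ cur)
      (pvLoopA (PySem.List.enumerate cur (pre.length : Int))
        (st.map (fun p => ((p.1 : Int), p.2)))) =
    pvLoopB cur (st.map (·.2))
      (match st with
       | some (s, _) => (pre.drop (s + 1)).foldl pvApplyKeys PySem.Dict.empty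
       | none => PySem.Dict.empty) := by
  intro cur
  induction cur with
  | nil =>
    intro pre st h
    rcases st with _ | ⟨s, c⟩ <;> simp [pvLoopA, pvLoopB, pvFinishA, PySem.List.enumerate]
  | cons line rest ih =>
    intro pre st h
    rw [PySem.List.enumerate_cons, show pre ++ line :: rest = (pre ++ [line]) ++ rest by simp]
    have hL : (pre.length : Int) + 1 = ((pre ++ [line]).length : Int) := by simp
    by_cases hin : PySem.Str.isIn "scan.Rule{" line = true
    · -- start token in line: both sides (re)start the block here
      have hinC : PySem.Chars.isIn "scan.Rule{".toList line.toList = true := by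
        simpa using hin
      have hne := pvStart_not_end hin
      have hnc : ¬ (PySem.Str.strip line = "}," ∧
          PySem.Str.find line "}," = PySem.Str.find line "scan.Rule{") := fun hx => hne hx.1
      have step : pvLoopA (((pre.length : Int), line) ::
            PySem.List.enumerate rest ((pre.length : Int) + 1))
            (st.map (fun p => ((p.1 : Int), p.2)))
          = pvLoopA (PySem.List.enumerate rest ((pre.length : Int) + 1))
              (some ((pre.length : Int), PySem.Str.find line "scan.Rule{")) := by
        simp only [pvLoopA]
        rw [if_pos hin]
        exact if_neg hnc
      rw [step, hL]
      have hrec := ih (pre ++ [line]) (some (pre.length, PySem.Str.find line "scan.Rule{"))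
        (by intro s c hsc; cases hsc; simp)
      simp only [Option.map_some] at hrec
      rw [hrec]
      have hdrop : ((pre ++ [line]).drop (pre.length + 1)) = ([] : List String) := by
        simp
      rw [hdrop]
      show _ = pvLoopB (line :: rest) _ _
      simp only [pvLoopB]
      rw [if_pos hin]
      rfl
    · have hin' : PySem.Str.isIn "scan.Rule{" line = false := by simpa using hin
      have hinC : PySem.Chars.isIn "scan.Rule{".toList line.toList = false := by
        simpa using hin'
      rcases st with _ | ⟨s, c⟩
      · -- outside any block: both sides skip the line
        have step : pvLoopA (((pre.length : Int), line) ::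
              PySem.List.enumerate rest ((pre.length : Int) + 1)) none
            = pvLoopA (PySem.List.enumerate rest ((pre.length : Int) + 1)) none := by
          simp only [pvLoopA]
          rw [if_neg hin]
        simp only [Option.map_none] at step ⊢
        rw [step, hL]
        have hrec := ih (pre ++ [line]) none (by intro s c hsc; cases hsc)
        simp only [Option.map_none] at hrec
        rw [hrec]
        show _ = pvLoopB (line :: rest) _ _
        simp only [pvLoopB]
        rw [if_neg hin]
      · have hs1 : s + 1 ≤ pre.length := h s c rfl
        by_cases hend : PySem.Str.strip line = "}," ∧ PySem.Str.find line "}," = c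
        · -- the block's end line: A breaks, B returns
          have step : pvLoopA (((pre.length : Int), line) ::
                PySem.List.enumerate rest ((pre.length : Int) + 1))
                ((some (s, c)).map (fun p => ((p.1 : Int), p.2)))
              = (some ((s : Int), c), some (pre.length : Int)) := by
            simp only [pvLoopA]
            rw [if_neg hin]
            simp only [Option.map_some]
            exact if_pos hend
          rw [step]
          have he0 : ¬ ((pre.length : Int) = 0) := by
            simp only [Int.natCast_eq_zero]
            omega
          simp only [pvFinishA, if_neg he0]
          rw [show (s : Int) + 1 = ((s + 1 : Nat) : Int) by push_cast; ring]
          rw [show (pre.length : Int) = ((pre.length : Nat) : Int) from rfl]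
          rw [PySem.List.slice_natCast]
          rw [show (pre ++ [line]) ++ rest = pre ++ (line :: rest) by simp]
          rw [List.drop_append_of_le_length hs1]
          rw [List.take_left' (by simp)]
          show _ = pvLoopB (line :: rest) _ _
          simp only [pvLoopB]
          rw [if_neg hin]
          simp only [Option.map_some]
          rw [if_pos hend]
        · -- inside the block: A moves on, B extracts this line now
          have step : pvLoopA (((pre.length : Int), line) ::
                PySem.List.enumerate rest ((pre.length : Int) + 1))
                ((some (s, c)).map (fun p => ((p.1 : Int), p.2)))
              = pvLoopA (PySem.List.enumerate rest ((pre.length : Int) + 1))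
                  (some ((s : Int), c)) := by
            simp only [pvLoopA]
            rw [if_neg hin]
            simp only [Option.map_some]
            exact if_neg hend
          rw [step, hL]
          have hrec := ih (pre ++ [line]) (some (s, c)) (by intro s' c' hsc; cases hsc; omega)
          simp only [Option.map_some] at hrec
          rw [hrec]
          rw [show (pre ++ [line]).drop (s + 1) = pre.drop (s + 1) ++ [line] from
            List.drop_append_of_le_length hs1]
          rw [List.foldl_append]
          show _ = pvLoopB (line :: rest) _ _
          simp only [pvLoopB]
          rw [if_neg hin]
          simp only [Option.map_some]
          rw [if_neg hend, List.foldl_cons, List.foldl_nil]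

theorem extract_rule_eq_alt (lines : List String) :
    extract_rule lines = extract_rule_alt lines := by
  rw [pvExtract_eq_finish]
  have := pvMain lines [] none (by intro s c h; cases h)
  simpa [extract_rule_alt] using this

-- ===== VERDICT (by name: the statement is the Claim_ definition above) =====
theorem extract_rule_spec : Claim_equal_extract_rule := by
  intro lines _
  unfold Spec_extract_rule
  exact extract_rule_eq_alt lines
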